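-- pv_equiv track=rewrite | github.com/wantonsolutions/replica-selection | plot/library/lib.py | calculateTotalSentRequests
-- ===== SOURCE A (Python) =====
-- def calculateTotalSentRequests(time,sent,rec,nid):
--     sentAgg = dict()
--     i = 0
--     diff = []
--     while i < len(time):
--         sentAgg[str(nid[i])] = sent[i]
--         s = 0
--         for r in sentAgg:
--             s += sentAgg[r]
--         diff.append(s)
--         i += 1
--     return diff
-- ===== SOURCE B (Python) =====
-- def calculateTotalSentRequests(time, sent, rec, nid):
--     # Stage 1: per-event delta = new sent value minus the node's previous stored value.
--     n = len(time)
--     last = {}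
--     deltas = []
--     for k, v in zip(nid[:n], sent[:n]):
--         deltas.append(v - last.get(k, 0))
--         last[k] = v
--     # Stage 2: prefix sums of the deltas.
--     out = []
--     t = 0
--     for d in deltas:
--         t += d
--         out.append(t)
--     return out
-- ===== Notes on version B (the rewrite author's own statement) =====
-- stated objective: faster
-- what changed: Instead of re-summing all dict values after each update, B computes in one dict pass the per-event delta (sent[i] minus the node's previous value) and then returns the prefix sums of those deltas, making each step O(1).
import Mathlib
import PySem

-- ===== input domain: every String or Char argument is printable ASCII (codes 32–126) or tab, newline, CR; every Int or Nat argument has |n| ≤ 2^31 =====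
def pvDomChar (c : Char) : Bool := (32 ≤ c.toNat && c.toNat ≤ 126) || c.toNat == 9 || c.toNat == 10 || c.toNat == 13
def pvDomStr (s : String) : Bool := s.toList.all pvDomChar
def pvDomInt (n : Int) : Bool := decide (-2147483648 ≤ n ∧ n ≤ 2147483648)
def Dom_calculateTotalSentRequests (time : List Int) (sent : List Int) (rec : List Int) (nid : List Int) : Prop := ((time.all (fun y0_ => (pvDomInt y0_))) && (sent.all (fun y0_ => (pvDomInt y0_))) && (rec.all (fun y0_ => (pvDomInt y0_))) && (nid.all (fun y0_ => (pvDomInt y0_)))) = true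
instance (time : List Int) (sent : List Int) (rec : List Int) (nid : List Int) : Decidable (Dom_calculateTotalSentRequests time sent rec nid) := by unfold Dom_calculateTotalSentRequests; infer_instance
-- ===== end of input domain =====

-- B replaces A's per-step rescan of the whole dict by two O(n) stages: a dict pass that
-- records each event's delta (sent[i] minus the node's previous value) and a prefix-sum pass.

-- ===== PORT A =====
-- inner loop 'for r in sentAgg: s += sentAgg[r]' (lookup of a present key; getD is exact there)
def pvSumA (d : PySem.Dict String Int) : Int :=
  d.keys.foldl (fun s r => s + d.getD r 0) 0

-- one iteration of A's while-loop; nid[i]/sent[i] with 0 ≤ i < len: pyGetD is exact under Pre_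
def pvStepA (nid sent : List Int) (st : PySem.Dict String Int × List Int) (i : Nat) :
    PySem.Dict String Int × List Int :=
  let d := st.1.insert (PySem.Int.toStr (PySem.List.pyGetD nid (i : Int) 0)) (PySem.List.pyGetD sent (i : Int) 0)
  (d, st.2 ++ [pvSumA d])

def calculateTotalSentRequests (time : List Int) (sent : List Int) (rec : List Int) (nid : List Int) : List Int :=
  ((List.range time.length).foldl (pvStepA nid sent) (PySem.Dict.empty, [])).2

-- ===== PORT B =====
-- stage 1: 'for k, v in zip(nid[:n], sent[:n]): deltas.append(v - last.get(k, 0)); last[k] = v'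
def pvDeltasB : PySem.Dict Int Int → List (Int × Int) → List Int
  | _, [] => []
  | last, (k, v) :: rest => (v - last.getD k 0) :: pvDeltasB (last.insert k v) rest

-- stage 2: 'for d in deltas: t += d; out.append(t)'
def pvPrefixB : Int → List Int → List Int
  | _, [] => []
  | t, d :: ds => (t + d) :: pvPrefixB (t + d) ds

def calculateTotalSentRequests_alt (time : List Int) (sent : List Int) (rec : List Int) (nid : List Int) : List Int :=
  pvPrefixB 0 (pvDeltasB PySem.Dict.empty
    ((PySem.List.slice nid none (some (time.length : Int))).zip
     (PySem.List.slice sent none (some (time.length : Int)))))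

-- ===== PRECONDITION & SPEC =====
-- Pre_ excludes exactly the inputs where A raises IndexError: sent or nid shorter than time.
def Pre_calculateTotalSentRequests (time : List Int) (sent : List Int) (rec : List Int) (nid : List Int) : Prop :=
  time.length ≤ sent.length ∧ time.length ≤ nid.length
instance (time : List Int) (sent : List Int) (rec : List Int) (nid : List Int) : Decidable (Pre_calculateTotalSentRequests time sent rec nid) := by unfold Pre_calculateTotalSentRequests; infer_instance

def pvWitness_calculateTotalSentRequests : List Int × List Int × List Int × List Int :=
  ([0, 1, 2], [5, 3, 4], [1, 1, 1], [7, 8, 7])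

def Spec_calculateTotalSentRequests (time : List Int) (sent : List Int) (rec : List Int) (nid : List Int) (out : List Int) : Prop := out = calculateTotalSentRequests_alt time sent rec nid
instance (time : List Int) (sent : List Int) (rec : List Int) (nid : List Int) (out : List Int) : Decidable (Spec_calculateTotalSentRequests time sent rec nid out) := by unfold Spec_calculateTotalSentRequests; infer_instance

-- ===== CLAIM (what is proved, stated in full; the proofs are below) =====
def Claim_equal_calculateTotalSentRequests : Prop := ∀ (time : List Int) (sent : List Int) (rec : List Int) (nid : List Int), Dom_calculateTotalSentRequests time sent rec nid → Pre_calculateTotalSentRequests time sent rec nid → Spec_calculateTotalSentRequests time sent rec nid (calculateTotalSentRequests time sent rec nid)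

-- ===== LEMMAS AND PROOFS =====

-- proof-side reference loop: the running-total fold A is first reduced to
def pvStepB (nid sent : List Int) (st : PySem.Dict Int Int × Int × List Int) (i : Nat) :
    PySem.Dict Int Int × Int × List Int :=
  let k := PySem.List.pyGetD nid (i : Int) 0
  let v := PySem.List.pyGetD sent (i : Int) 0
  let t := st.2.1 + (v - st.1.getD k 0)
  (st.1.insert k v, t, st.2.2 ++ [t])

-- str is injective on ints: decimal digit lists determine the number
theorem pv_digitChar_inj : ∀ n < 10, ∀ m < 10, Nat.digitChar n = Nat.digitChar m → n = m := by decide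

theorem pv_toDigits10_inj : ∀ n m : Nat, Nat.toDigits 10 n = Nat.toDigits 10 m → n = m := by
  intro n
  induction n using Nat.strong_induction_on with
  | _ n ih =>
    intro m h
    rw [Nat.toDigits_eq_if (n := n) (by norm_num), Nat.toDigits_eq_if (n := m) (by norm_num)] at h
    by_cases hn : n < 10 <;> by_cases hm : m < 10
    · rw [if_pos hn, if_pos hm] at h
      exact pv_digitChar_inj _ hn _ hm (List.cons_eq_cons.mp h).1
    · rw [if_pos hn, if_neg hm] at h
      have hlen := congrArg List.length h
      simp only [List.length_cons, List.length_nil, List.length_append] at hlen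
      have := @Nat.length_toDigits_pos 10 (m / 10)
      omega
    · rw [if_neg hn, if_pos hm] at h
      have hlen := congrArg List.length h
      simp only [List.length_cons, List.length_nil, List.length_append] at hlen
      have := @Nat.length_toDigits_pos 10 (n / 10)
      omega
    · rw [if_neg hn, if_neg hm] at h
      obtain ⟨h3, h4⟩ := List.append_inj' h rfl
      have hdiv : n / 10 = m / 10 := ih (n / 10) (Nat.div_lt_self (by omega) (by norm_num)) _ h3
      have hmod := pv_digitChar_inj _ (Nat.mod_lt _ (by norm_num)) _ (Nat.mod_lt _ (by norm_num))
        (List.cons_eq_cons.mp h4).1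
      omega

theorem pv_dash_not_mem_toDigits (x : Nat) : '-' ∉ Nat.toDigits 10 x := by
  intro hmem
  have := Nat.isDigit_of_mem_toDigits (by norm_num) (by norm_num) hmem
  simp [Char.isDigit] at this

theorem pv_toChars_inj (n m : Int) (h : PySem.Int.toChars n = PySem.Int.toChars m) : n = m := by
  unfold PySem.Int.toChars at h
  split_ifs at h with h1 h2 h2
  · have : n.natAbs = m.natAbs := pv_toDigits10_inj _ _ (by injection h)
    omega
  · exact absurd (h ▸ List.mem_cons_self) (pv_dash_not_mem_toDigits _)
  · exact absurd (h.symm ▸ List.mem_cons_self) (pv_dash_not_mem_toDigits _)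
  · have : n.toNat = m.toNat := pv_toDigits10_inj _ _ h
    omega

theorem pv_toStr_inj (n m : Int) (h : PySem.Int.toStr n = PySem.Int.toStr m) : n = m :=
  pv_toChars_inj n m (String.ofList_inj.mp h)

-- the key-renaming map between the reference dict and A's dict
def pvF (p : Int × Int) : String × Int := (PySem.Int.toStr p.1, p.2)

theorem pv_get?_map (l : List (Int × Int)) (k : Int) :
    (PySem.Dict.mk (l.map pvF)).get? (PySem.Int.toStr k) = (PySem.Dict.mk l).get? k := by
  induction l with
  | nil => rfl
  | cons a l ihl =>
    obtain ⟨a1, a2⟩ := a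
    simp only [List.map_cons, pvF, PySem.Dict.get?_mk_cons]
    by_cases hk : a1 = k
    · simp [hk]
    · have h1 : (PySem.Int.toStr a1 == PySem.Int.toStr k) = false := by
        simp only [beq_eq_false_iff_ne, ne_eq]
        exact fun hc => hk (pv_toStr_inj _ _ hc)
      simp [h1, beq_eq_false_iff_ne.mpr hk, ihl]

theorem pv_contains_map (d : PySem.Dict Int Int) (k : Int) :
    (PySem.Dict.mk (d.items.map pvF)).contains (PySem.Int.toStr k) = d.contains k := by
  rw [PySem.Dict.contains_eq_isSome_get?, PySem.Dict.contains_eq_isSome_get?, pv_get?_map]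

theorem pv_items_insert_map (d : PySem.Dict Int Int) (k v : Int) :
    ((PySem.Dict.mk (d.items.map pvF)).insert (PySem.Int.toStr k) v).items
      = (d.insert k v).items.map pvF := by
  rw [PySem.Dict.items_insert, PySem.Dict.items_insert, pv_contains_map]
  by_cases hc : d.contains k = true
  · simp only [hc, if_true, List.map_map]
    apply List.map_congr_left
    intro p _
    by_cases hp : p.1 = k
    · simp [pvF, hp]
    · have h1 : (PySem.Int.toStr p.1 == PySem.Int.toStr k) = false := by
        simp only [beq_eq_false_iff_ne, ne_eq]
        exact fun hc' => hp (pv_toStr_inj _ _ hc')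
      simp [Function.comp, pvF, h1, beq_eq_false_iff_ne.mpr hp]
  · simp only [Bool.not_eq_true] at hc
    simp [hc, pvF]

-- sum of the stored values
def pvSumV {κ : Type} (l : List (κ × Int)) : Int := (l.map (·.2)).sum

theorem pv_sumV_map (l : List (Int × Int)) : pvSumV (l.map pvF) = pvSumV l := by
  unfold pvSumV
  rw [List.map_map]
  rfl

-- A's inner loop computes the value sum of its dict
theorem pv_sumA_eq (d : PySem.Dict String Int) (h : d.keys.Nodup) : pvSumA d = pvSumV d.items := by
  unfold pvSumA
  rw [PySem.List.foldl_add, ← PySem.Dict.values_eq_map_keys d h 0]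
  simp [pvSumV, PySem.Dict.values]

-- overwriting the (unique) entry for a present key k with v changes the sum by v - old
theorem pv_sumV_replace (k v : Int) (l : List (Int × Int)) :
    (l.map (·.1)).Nodup → (PySem.Dict.mk l).contains k = true →
    pvSumV (l.map (fun p => if (p.1 == k) = true then (k, v) else p))
      = pvSumV l + (v - (PySem.Dict.mk l).getD k 0) := by
  induction l with
  | nil => intro _ hc; simp [PySem.Dict.contains] at hc
  | cons a l ihl =>
    intro h hc
    obtain ⟨a1, a2⟩ := a
    simp only [List.map_cons, List.nodup_cons] at h
    rw [PySem.Dict.getD_eq_get?_getD, PySem.Dict.get?_mk_cons]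
    by_cases hk : a1 = k
    · have hrest : l.map (fun p => if (p.1 == k) = true then (k, v) else p) = l := by
        have hmc : l.map (fun p => if (p.1 == k) = true then (k, v) else p) = l.map id := by
          apply List.map_congr_left
          intro p hp
          have hpk : p.1 ≠ k := fun hpk => h.1 (hk ▸ hpk ▸ List.mem_map_of_mem hp)
          simp [beq_eq_false_iff_ne.mpr hpk]
        simpa using hmc
      have hhead : (a1 == k) = true := beq_iff_eq.mpr hk
      simp only [List.map_cons, hhead, if_true, hrest, pvSumV, List.sum_cons,
        Option.getD_some, List.map_cons]
      omega
    · have hbe : (a1 == k) = false := beq_eq_false_iff_ne.mpr hk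
      have hc' : (PySem.Dict.mk l).contains k = true := by
        simp only [PySem.Dict.contains, List.any_cons, hbe, Bool.false_or] at hc
        exact hc
      have hih := ihl h.2 hc'
      rw [PySem.Dict.getD_eq_get?_getD] at hih
      simp only [List.map_cons, hbe, Bool.false_eq_true, if_false, pvSumV, List.sum_cons] at hih ⊢
      omega

-- inserting k ↦ v changes the value sum by v minus the old value of k
theorem pv_sumV_insert (d : PySem.Dict Int Int) (k v : Int) (h : d.keys.Nodup) :
    pvSumV (d.insert k v).items = pvSumV d.items + (v - d.getD k 0) := by
  rw [PySem.Dict.items_insert]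
  by_cases hc : d.contains k = true
  · rw [if_pos hc]
    obtain ⟨l⟩ := d
    exact pv_sumV_replace k v l (by simpa [PySem.Dict.keys] using h) hc
  · rw [if_neg hc]
    simp only [Bool.not_eq_true] at hc
    rw [PySem.Dict.getD_of_not_contains _ 0 hc]
    simp [pvSumV]

theorem pv_keys_map (d : PySem.Dict Int Int) :
    (PySem.Dict.mk (d.items.map pvF)).keys = d.keys.map PySem.Int.toStr := by
  simp [PySem.Dict.keys, List.map_map, pvF, Function.comp]

-- invariant: A's state is the reference loop's state with keys stringified and the sum cached
theorem pv_main (nid sent : List Int) (l : List Nat) :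
    ∀ (dB : PySem.Dict Int Int) (total : Int) (acc : List Int),
    dB.keys.Nodup → total = pvSumV dB.items →
    (l.foldl (pvStepA nid sent) (PySem.Dict.mk (dB.items.map pvF), acc)).2
      = (l.foldl (pvStepB nid sent) (dB, total, acc)).2.2 := by
  induction l with
  | nil => intro dB total acc _ _; rfl
  | cons i l ihl =>
    intro dB total acc hnd htot
    simp only [List.foldl_cons]
    set k := PySem.List.pyGetD nid (i : Int) 0 with hk
    set v := PySem.List.pyGetD sent (i : Int) 0 with hv
    have hins : (PySem.Dict.mk (dB.items.map pvF)).insert (PySem.Int.toStr k) v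
        = PySem.Dict.mk ((dB.insert k v).items.map pvF) :=
      PySem.Dict.ext (pv_items_insert_map dB k v)
    have hndA : ((PySem.Dict.mk ((dB.insert k v).items.map pvF)) :
        PySem.Dict String Int).keys.Nodup := by
      rw [pv_keys_map]
      exact (PySem.Dict.nodup_keys_insert dB k v hnd).map (fun _ _ => pv_toStr_inj _ _)
    have hsum : pvSumA (PySem.Dict.mk ((dB.insert k v).items.map pvF))
        = total + (v - dB.getD k 0) := by
      rw [pv_sumA_eq _ hndA]
      show pvSumV ((dB.insert k v).items.map pvF) = _
      rw [pv_sumV_map, pv_sumV_insert dB k v hnd, htot]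
    show (l.foldl (pvStepA nid sent) (pvStepA nid sent (PySem.Dict.mk (dB.items.map pvF), acc) i)).2 = _
    rw [show pvStepA nid sent (PySem.Dict.mk (dB.items.map pvF), acc) i
        = (PySem.Dict.mk ((dB.insert k v).items.map pvF),
           acc ++ [total + (v - dB.getD k 0)]) by
      unfold pvStepA; rw [← hk, ← hv]
      simp only [hins, hsum]]
    exact ihl (dB.insert k v) (total + (v - dB.getD k 0)) (acc ++ [total + (v - dB.getD k 0)])
      (PySem.Dict.nodup_keys_insert dB k v hnd)
      (by rw [pv_sumV_insert dB k v hnd, htot])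

-- bridge: the running-total fold over indices equals B's deltas + prefix-sum decomposition
theorem pv_bridge (nid sent : List Int) (n : Nat) (hn1 : n ≤ nid.length) (hn2 : n ≤ sent.length) :
    ∀ (m i : Nat) (dB : PySem.Dict Int Int) (total : Int) (acc : List Int), i + m = n →
    ((List.range' i m).foldl (pvStepB nid sent) (dB, total, acc)).2.2
      = acc ++ pvPrefixB total (pvDeltasB dB (((nid.take n).drop i).zip ((sent.take n).drop i))) := by
  intro m
  induction m with
  | zero =>
    intro i dB total acc hi
    have h1 : (nid.take n).drop i = [] := by
      apply List.drop_eq_nil_of_le; simp; omega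
    simp [h1, pvDeltasB, pvPrefixB]
  | succ m ihm =>
    intro i dB total acc hi
    have hilt : i < n := by omega
    have hk : PySem.List.pyGetD nid (i : Int) 0 = nid[i]'(by omega) := by
      rw [PySem.List.pyGetD_natCast]
      exact List.getD_eq_getElem _ _ (by omega)
    have hv : PySem.List.pyGetD sent (i : Int) 0 = sent[i]'(by omega) := by
      rw [PySem.List.pyGetD_natCast]
      exact List.getD_eq_getElem _ _ (by omega)
    have hdn : (nid.take n).drop i
        = nid[i]'(by omega) :: (nid.take n).drop (i + 1) := by
      rw [List.drop_eq_getElem_cons (by simp; omega)]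
      congr 1
      exact List.getElem_take
    have hds : (sent.take n).drop i
        = sent[i]'(by omega) :: (sent.take n).drop (i + 1) := by
      rw [List.drop_eq_getElem_cons (by simp; omega)]
      congr 1
      exact List.getElem_take
    rw [List.range'_succ, List.foldl_cons]
    show ((List.range' (i+1) m).foldl (pvStepB nid sent) (pvStepB nid sent (dB, total, acc) i)).2.2 = _
    rw [show pvStepB nid sent (dB, total, acc) i
        = (dB.insert (nid[i]'(by omega)) (sent[i]'(by omega)),
           total + (sent[i]'(by omega) - dB.getD (nid[i]'(by omega)) 0),
           acc ++ [total + (sent[i]'(by omega) - dB.getD (nid[i]'(by omega)) 0)]) by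
      unfold pvStepB; rw [hk, hv]]
    rw [ihm (i + 1) _ _ _ (by omega)]
    rw [hdn, hds, List.zip_cons_cons, pvDeltasB, pvPrefixB]
    simp

-- ===== VERDICT (by name: the statement is the Claim_ definition above) =====
theorem calculateTotalSentRequests_spec : Claim_equal_calculateTotalSentRequests := by
  intro time sent rec nid _ hpre
  unfold Spec_calculateTotalSentRequests calculateTotalSentRequests calculateTotalSentRequests_alt
  rw [show (PySem.Dict.empty : PySem.Dict String Int)
      = PySem.Dict.mk (((PySem.Dict.empty : PySem.Dict Int Int)).items.map pvF) from rfl,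
    pv_main nid sent (List.range time.length) PySem.Dict.empty 0 [] PySem.Dict.nodup_keys_empty rfl]
  rw [List.range_eq_range',
    pv_bridge nid sent time.length hpre.2 hpre.1 time.length 0 PySem.Dict.empty 0 [] (by omega)]
  simp [PySem.List.slice_to_natCast]
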